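-- pv_equiv track=rewrite | github.com/G381N/ZTA | src/monitoring/event_collector.py | _categorize_suspicious_app
-- ===== SOURCE A (Python) =====
-- def _categorize_suspicious_app(keyword):
--     """Categorize the type of suspicious application."""
--     categories = {
--         'network_recon': ['nmap', 'masscan', 'zmap', 'nikto', 'dirb'],
--         'network_tools': ['netcat', 'ncat', 'nc', 'wireshark', 'tcpdump'],
--         'remote_access': ['ssh', 'telnet', 'vnc', 'rdp'],
--         'exploit_tools': ['metasploit', 'burp', 'sqlmap'],
--         'password_attack': ['hashcat', 'john', 'hydra', 'medusa'],
--         'wireless_attack': ['aircrack', 'kismet', 'wifite'],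
--         'malware': ['keylog', 'rootkit', 'backdoor', 'trojan'],
--         'anonymity': ['tor', 'proxychains', 'torsocks'],
--         'privilege_esc': ['sudo', 'su', 'pkexec']
--     }
--
--     for category, keywords in categories.items():
--         if keyword in keywords:
--             return category
--     return 'unknown'
-- ===== SOURCE B (Python) =====
-- # Flat keyword->category table written out once; lookup with default replaces the per-category scan.
-- _KEYWORD_TO_CATEGORY = {
--     'nmap': 'network_recon',
--     'masscan': 'network_recon',
--     'zmap': 'network_recon',
--     'nikto': 'network_recon',
--     'dirb': 'network_recon',
--     'netcat': 'network_tools',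
--     'ncat': 'network_tools',
--     'nc': 'network_tools',
--     'wireshark': 'network_tools',
--     'tcpdump': 'network_tools',
--     'ssh': 'remote_access',
--     'telnet': 'remote_access',
--     'vnc': 'remote_access',
--     'rdp': 'remote_access',
--     'metasploit': 'exploit_tools',
--     'burp': 'exploit_tools',
--     'sqlmap': 'exploit_tools',
--     'hashcat': 'password_attack',
--     'john': 'password_attack',
--     'hydra': 'password_attack',
--     'medusa': 'password_attack',
--     'aircrack': 'wireless_attack',
--     'kismet': 'wireless_attack',
--     'wifite': 'wireless_attack',
--     'keylog': 'malware',
--     'rootkit': 'malware',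
--     'backdoor': 'malware',
--     'trojan': 'malware',
--     'tor': 'anonymity',
--     'proxychains': 'anonymity',
--     'torsocks': 'anonymity',
--     'sudo': 'privilege_esc',
--     'su': 'privilege_esc',
--     'pkexec': 'privilege_esc',
-- }
--
--
-- def _categorize_suspicious_app(keyword):
--     """Categorize the type of suspicious application."""
--     return _KEYWORD_TO_CATEGORY.get(keyword, 'unknown')
-- ===== Notes on version B (the rewrite author's own statement) =====
-- stated objective: idiomatic
-- what changed: Replaces the per-call scan over nested category lists with a flat keyword-to-category dict written out once, so each call is a single table lookup with the same fallback default.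
import Mathlib
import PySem

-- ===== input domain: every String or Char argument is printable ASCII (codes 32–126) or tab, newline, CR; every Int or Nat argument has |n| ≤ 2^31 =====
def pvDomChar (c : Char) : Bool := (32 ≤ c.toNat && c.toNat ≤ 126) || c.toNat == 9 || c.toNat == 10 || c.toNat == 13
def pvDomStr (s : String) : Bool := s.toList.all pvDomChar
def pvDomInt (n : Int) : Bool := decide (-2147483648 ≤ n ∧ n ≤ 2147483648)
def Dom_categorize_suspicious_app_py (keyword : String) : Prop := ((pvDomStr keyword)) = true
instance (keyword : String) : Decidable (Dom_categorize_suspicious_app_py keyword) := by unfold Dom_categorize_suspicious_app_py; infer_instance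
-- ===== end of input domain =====

set_option maxRecDepth 10000


-- B replaces A's per-call scan over nested category lists by a flat keyword→category
-- table written out once, queried with a single dict lookup defaulting to "unknown" (idiomatic).

-- ===== PORT A =====
-- the literal 'categories' dict of A, as an insertion-ordered association list
def pvCategoriesA : List (String × List String) :=
  [("network_recon", ["nmap", "masscan", "zmap", "nikto", "dirb"]),
   ("network_tools", ["netcat", "ncat", "nc", "wireshark", "tcpdump"]),
   ("remote_access", ["ssh", "telnet", "vnc", "rdp"]),
   ("exploit_tools", ["metasploit", "burp", "sqlmap"]),
   ("password_attack", ["hashcat", "john", "hydra", "medusa"]),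
   ("wireless_attack", ["aircrack", "kismet", "wifite"]),
   ("malware", ["keylog", "rootkit", "backdoor", "trojan"]),
   ("anonymity", ["tor", "proxychains", "torsocks"]),
   ("privilege_esc", ["sudo", "su", "pkexec"])]

-- 'for category, keywords in categories.items(): if keyword in keywords: return category' ; 'return unknown'
def pvLoopA (keyword : String) : List (String × List String) → String
  | [] => "unknown"
  | (category, keywords) :: rest =>
      if keywords.contains keyword then category else pvLoopA keyword rest

def categorize_suspicious_app_py (keyword : String) : String :=
  pvLoopA keyword pvCategoriesA

-- ===== PORT B =====
-- _KEYWORD_TO_CATEGORY: the flat literal table of Source B (its own literal, independent of A's)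
def pvKeywordToCategory : PySem.Dict String String :=
  PySem.Dict.mk
  [("nmap", "network_recon"),
   ("masscan", "network_recon"),
   ("zmap", "network_recon"),
   ("nikto", "network_recon"),
   ("dirb", "network_recon"),
   ("netcat", "network_tools"),
   ("ncat", "network_tools"),
   ("nc", "network_tools"),
   ("wireshark", "network_tools"),
   ("tcpdump", "network_tools"),
   ("ssh", "remote_access"),
   ("telnet", "remote_access"),
   ("vnc", "remote_access"),
   ("rdp", "remote_access"),
   ("metasploit", "exploit_tools"),
   ("burp", "exploit_tools"),
   ("sqlmap", "exploit_tools"),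
   ("hashcat", "password_attack"),
   ("john", "password_attack"),
   ("hydra", "password_attack"),
   ("medusa", "password_attack"),
   ("aircrack", "wireless_attack"),
   ("kismet", "wireless_attack"),
   ("wifite", "wireless_attack"),
   ("keylog", "malware"),
   ("rootkit", "malware"),
   ("backdoor", "malware"),
   ("trojan", "malware"),
   ("tor", "anonymity"),
   ("proxychains", "anonymity"),
   ("torsocks", "anonymity"),
   ("sudo", "privilege_esc"),
   ("su", "privilege_esc"),
   ("pkexec", "privilege_esc")]

-- return _KEYWORD_TO_CATEGORY.get(keyword, 'unknown')
def categorize_suspicious_app_py_alt (keyword : String) : String :=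
  pvKeywordToCategory.getD keyword "unknown"

-- ===== PRECONDITION & SPEC =====
def Spec_categorize_suspicious_app_py (keyword : String) (out : String) : Prop := out = categorize_suspicious_app_py_alt keyword
instance (keyword : String) (out : String) : Decidable (Spec_categorize_suspicious_app_py keyword out) := by unfold Spec_categorize_suspicious_app_py; infer_instance

-- ===== CLAIM (what is proved, stated in full; the proofs are below) =====
def Claim_equal_categorize_suspicious_app_py : Prop := ∀ (keyword : String), Dom_categorize_suspicious_app_py keyword → Spec_categorize_suspicious_app_py keyword (categorize_suspicious_app_py keyword)

-- ===== LEMMAS AND PROOFS =====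

-- ===== VERDICT (by name: the statement is the Claim_ definition above) =====
theorem categorize_suspicious_app_py_spec : Claim_equal_categorize_suspicious_app_py := by
  intro keyword _
  unfold Spec_categorize_suspicious_app_py categorize_suspicious_app_py categorize_suspicious_app_py_alt
  simp only [pvCategoriesA, pvKeywordToCategory, pvLoopA, List.contains_cons, List.contains_nil,
    PySem.Dict.getD_eq_get?_getD, PySem.Dict.get?_mk_cons, Bool.or_false, beq_iff_eq]
  by_cases h1 : keyword = "nmap"; · subst h1; decide
  by_cases h2 : keyword = "masscan"; · subst h2; decide
  by_cases h3 : keyword = "zmap"; · subst h3; decide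
  by_cases h4 : keyword = "nikto"; · subst h4; decide
  by_cases h5 : keyword = "dirb"; · subst h5; decide
  by_cases h6 : keyword = "netcat"; · subst h6; decide
  by_cases h7 : keyword = "ncat"; · subst h7; decide
  by_cases h8 : keyword = "nc"; · subst h8; decide
  by_cases h9 : keyword = "wireshark"; · subst h9; decide
  by_cases h10 : keyword = "tcpdump"; · subst h10; decide
  by_cases h11 : keyword = "ssh"; · subst h11; decide
  by_cases h12 : keyword = "telnet"; · subst h12; decide
  by_cases h13 : keyword = "vnc"; · subst h13; decide
  by_cases h14 : keyword = "rdp"; · subst h14; decide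
  by_cases h15 : keyword = "metasploit"; · subst h15; decide
  by_cases h16 : keyword = "burp"; · subst h16; decide
  by_cases h17 : keyword = "sqlmap"; · subst h17; decide
  by_cases h18 : keyword = "hashcat"; · subst h18; decide
  by_cases h19 : keyword = "john"; · subst h19; decide
  by_cases h20 : keyword = "hydra"; · subst h20; decide
  by_cases h21 : keyword = "medusa"; · subst h21; decide
  by_cases h22 : keyword = "aircrack"; · subst h22; decide
  by_cases h23 : keyword = "kismet"; · subst h23; decide
  by_cases h24 : keyword = "wifite"; · subst h24; decide
  by_cases h25 : keyword = "keylog"; · subst h25; decide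
  by_cases h26 : keyword = "rootkit"; · subst h26; decide
  by_cases h27 : keyword = "backdoor"; · subst h27; decide
  by_cases h28 : keyword = "trojan"; · subst h28; decide
  by_cases h29 : keyword = "tor"; · subst h29; decide
  by_cases h30 : keyword = "proxychains"; · subst h30; decide
  by_cases h31 : keyword = "torsocks"; · subst h31; decide
  by_cases h32 : keyword = "sudo"; · subst h32; decide
  by_cases h33 : keyword = "su"; · subst h33; decide
  by_cases h34 : keyword = "pkexec"; · subst h34; decide
  simp [beq_iff_eq, PySem.Dict.get?, h1, h2, h3, h4, h5, h6, h7, h8, h9, h10, h11, h12, h13, h14, h15, h16, h17, h18, h19, h20, h21, h22, h23, h24, h25, h26, h27, h28, h29, h30, h31, h32, h33, h34, Ne.symm h1, Ne.symm h2, Ne.symm h3, Ne.symm h4, Ne.symm h5, Ne.symm h6, Ne.symm h7, Ne.symm h8, Ne.symm h9, Ne.symm h10, Ne.symm h11, Ne.symm h12, Ne.symm h13, Ne.symm h14, Ne.symm h15, Ne.symm h16, Ne.symm h17, Ne.symm h18, Ne.symm h19, Ne.symm h20, Ne.symm h21, Ne.symm h22, Ne.symm h23, Ne.symm h24, Ne.symm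 h25, Ne.symm h26, Ne.symm h27, Ne.symm h28, Ne.symm h29, Ne.symm h30, Ne.symm h31, Ne.symm h32, Ne.symm h33, Ne.symm h34]
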